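-- pv_equiv track=rewrite | github.com/fyllmax/Programming101 | week0/Problem10_Is number balanced/solution.py | is_number_balanced
-- ===== SOURCE A (Python) =====
-- def is_number_balanced(n):
--     sum1 = 0
--     sum2 = 0
--     x = str(n)
--     y = len(x)
--     z = y // 2
--
--     if y % 2 != 0:
--         a = x[0: z]
--         b = x[z + 1:]
--
--     else:
--         a = x[0: z]
--         b = x[z:]
--
--     for i in a:
--         c = int(i)
--         sum1 = sum1 + c
--
--     for j in b:
--         d = int(j)
--         sum2 = sum2 + d
--
--     if sum1 == sum2:
--         return True
--     else:
--         return False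
-- ===== SOURCE B (Python) =====
-- def is_number_balanced(n):
--     x = str(n)
--     i, j = 0, len(x) - 1
--     left = 0
--     right = 0
--     while i < j:
--         left += int(x[i])
--         right += int(x[j])
--         i += 1
--         j -= 1
--     return left == right
-- ===== Notes on version B (the rewrite author's own statement) =====
-- stated objective: alternative
-- what changed: Replaces the slice-into-two-halves plus two separate summing loops with a single inward two-pointer sweep that accumulates both half sums in one pass and skips the middle digit automatically on odd lengths.
import Mathlib
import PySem

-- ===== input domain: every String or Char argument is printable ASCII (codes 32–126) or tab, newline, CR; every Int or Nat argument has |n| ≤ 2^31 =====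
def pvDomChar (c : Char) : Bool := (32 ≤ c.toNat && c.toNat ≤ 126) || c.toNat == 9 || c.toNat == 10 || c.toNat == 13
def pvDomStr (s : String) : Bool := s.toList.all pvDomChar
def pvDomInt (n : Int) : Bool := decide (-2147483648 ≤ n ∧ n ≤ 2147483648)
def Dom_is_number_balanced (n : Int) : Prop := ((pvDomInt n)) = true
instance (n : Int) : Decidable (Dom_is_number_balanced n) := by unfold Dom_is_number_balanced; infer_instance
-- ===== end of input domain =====

-- B replaces A's two slices and two summing loops by one inward two-pointer sweep (alternative
-- decomposition, same cost); equivalence proved for n ≥ 0 (A raises ValueError on int('-') otherwise).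

-- ===== PORT A =====
-- int(i) for a one-character string; under Pre_ (n ≥ 0) the character is always a digit,
-- so the .getD 0 default is never used (Python would raise ValueError exactly outside Pre_).
def pvDig (c : Char) : Int := (PySem.Int.ofStr? (String.mk [c])).getD 0

def is_number_balanced (n : Int) : Bool :=
  let x := PySem.Int.toChars n          -- x = str(n), as its character list
  let y := x.length
  let z := y / 2
  let a := PySem.List.slice x none (some (z : Int))                 -- x[0:z]
  let b := if y % 2 ≠ 0 then PySem.List.slice x (some ((z : Int) + 1)) none   -- x[z+1:]
           else PySem.List.slice x (some (z : Int)) none                      -- x[z:]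
  let sum1 := a.foldl (fun s c => s + pvDig c) 0
  let sum2 := b.foldl (fun s c => s + pvDig c) 0
  sum1 == sum2

-- ===== PORT B =====
-- the two-pointer while loop of Source B; x[i]/x[j] are always in range when i < j ≤ len-1,
-- ported as getD (exact on every reachable access)
def pvLoop (x : List Char) (i j : Nat) (l r : Int) : Int × Int :=
  if _h : i < j then
    pvLoop x (i + 1) (j - 1) (l + pvDig (x.getD i ' ')) (r + pvDig (x.getD j ' '))
  else (l, r)
termination_by j - i

def is_number_balanced_alt (n : Int) : Bool :=
  let x := PySem.Int.toChars n
  let p := pvLoop x 0 (x.length - 1) 0 0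
  p.1 == p.2

-- ===== PRECONDITION & SPEC =====
-- Pre_ excludes n < 0: there str(n) starts with '-' and int('-') raises ValueError in A (and in B).
def Pre_is_number_balanced (n : Int) : Prop := 0 ≤ n
instance (n : Int) : Decidable (Pre_is_number_balanced n) := by unfold Pre_is_number_balanced; infer_instance
def pvWitness_is_number_balanced : Int := (12321)

def Spec_is_number_balanced (n : Int) (out : Bool) : Prop := out = is_number_balanced_alt n
instance (n : Int) (out : Bool) : Decidable (Spec_is_number_balanced n out) := by unfold Spec_is_number_balanced; infer_instance

-- ===== CLAIM (what is proved, stated in full; the proofs are below) =====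
def Claim_equal_is_number_balanced : Prop := ∀ (n : Int), Dom_is_number_balanced n → Pre_is_number_balanced n → Spec_is_number_balanced n (is_number_balanced n)

-- ===== LEMMAS AND PROOFS =====

def pvSum (cs : List Char) : Int := (cs.map pvDig).sum

theorem pvFoldl_eq_sum (cs : List Char) : ∀ a : Int,
    cs.foldl (fun s c => s + pvDig c) a = a + pvSum cs := by
  induction cs with
  | nil => intro a; simp [pvSum]
  | cons c t ih => intro a; simp [pvSum, List.foldl, ih, List.map, List.sum_cons]; ring

theorem pvLoop_spec (x : List Char) (d : Nat) : ∀ i j : Nat, ∀ l r : Int, j - i = d → j < x.length →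
    pvLoop x i j l r =
      (l + pvSum ((x.drop i).take ((j - i + 1) / 2)),
       r + pvSum ((x.take (j + 1)).drop (j + 1 - (j - i + 1) / 2))) := by
  induction d using Nat.strong_induction_on with
  | _ d ih =>
    intro i j l r hd hj
    by_cases h : i < j
    · rw [pvLoop]; simp only [h, dite_true]
      have hd2 : (j - 1) - (i + 1) = d - 2 := by omega
      have hlt : d - 2 < d := by omega
      rw [ih (d - 2) hlt (i + 1) (j - 1) _ _ hd2 (by omega)]
      have hs : (j - i + 1) / 2 = ((j - 1) - (i + 1) + 1) / 2 + 1 := by omega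
      set s' := ((j - 1) - (i + 1) + 1) / 2 with hs'
      have hi : i < x.length := by omega
      have hdrop : x.drop i = x[i] :: x.drop (i + 1) := (List.getElem_cons_drop hi).symm
      have htake : x.take (j + 1) = x.take j ++ [x[j]] := by
        rw [List.take_succ]; simp [hj]
      have hs'le : j - s' ≤ j := by omega
      rw [Prod.mk.injEq]
      constructor
      · -- left accumulator
        rw [hs, hdrop, List.take_succ_cons]
        simp only [pvSum, List.map_cons, List.sum_cons,
          List.getD_eq_getElem x ' ' hi]
        ring
      · -- right accumulator
        have hjj : (j - 1) + 1 = j := by omega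
        rw [hs, hjj, htake]
        have hlen : j - s' ≤ (x.take j).length := by
          simp [List.length_take]; omega
        rw [show j + 1 - (s' + 1) = j - s' by omega,
            List.drop_append_of_le_length hlen]
        simp only [pvSum, List.map_append, List.sum_append, List.map_cons,
          List.map_nil, List.sum_cons, List.sum_nil,
          List.getD_eq_getElem x ' ' hj]
        ring
    · rw [pvLoop]; simp only [h, dite_false]
      have h0 : j - i = 0 := by omega
      rw [h0]
      simp [pvSum, List.drop_eq_nil_of_le, List.length_take]

theorem pvSlice_a (x : List Char) (z : Nat) :
    PySem.List.slice x none (some (z : Int)) = x.take z :=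
  PySem.List.slice_to_natCast x z

theorem pvSlice_b (x : List Char) (z : Nat) :
    PySem.List.slice x (some (z : Int)) none = x.drop z :=
  PySem.List.slice_from_natCast x z

-- ===== VERDICT (by name: the statement is the Claim_ definition above) =====
theorem is_number_balanced_spec : Claim_equal_is_number_balanced := by
  intro n _ _
  simp only [Spec_is_number_balanced, is_number_balanced, is_number_balanced_alt]
  set x := PySem.Int.toChars n with hx
  rcases List.eq_nil_or_concat x with hnil | ⟨_, _, hcat⟩
  · -- empty digit string (unreachable for str(n), handled directly)
    rw [hnil]
    rw [pvLoop]
    simp [PySem.List.slice]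
  · have hlen : 1 ≤ x.length := by rw [hcat]; simp
    have hj : x.length - 1 < x.length := by omega
    rw [pvLoop_spec x (x.length - 1 - 0) 0 (x.length - 1) 0 0 rfl hj]
    have hs : (x.length - 1 - 0 + 1) / 2 = x.length / 2 := by omega
    have hjj : x.length - 1 + 1 = x.length := by omega
    rw [hs, hjj]
    simp only [List.drop_zero, List.take_length, zero_add]
    set y := x.length with hy
    set z := y / 2 with hz
    have ha : PySem.List.slice x none (some (z : Int)) = x.take z := pvSlice_a x z
    by_cases hodd : y % 2 ≠ 0
    · have hb : PySem.List.slice x (some ((z : Int) + 1)) none = x.drop (z + 1) := by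
        rw [show ((z : Int) + 1) = ((z + 1 : Nat) : Int) by push_cast; ring]
        exact pvSlice_b x (z + 1)
      have hyz : y - z = z + 1 := by omega
      rw [if_pos hodd]
      simp only [ha, hb, hyz, pvFoldl_eq_sum, zero_add]
    · have hb : PySem.List.slice x (some (z : Int)) none = x.drop z := pvSlice_b x z
      have hyz : y - z = z := by omega
      rw [if_neg hodd]
      simp only [ha, hb, hyz, pvFoldl_eq_sum, zero_add]
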